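-- pv_equiv track=rewrite | github.com/xuthreekid/clawchain | backend/tools/apply_patch_tool.py | _seek_sequence
-- ===== SOURCE A (Python) =====
-- def _seek_sequence(
--     lines: list[str],
--     pattern: list[str],
--     start: int,
--     eof: bool,
-- ) -> int | None:
--     if not pattern:
--         return start
--     if len(pattern) > len(lines):
--         return None
--     max_start = len(lines) - len(pattern)
--     search_start = max_start if (eof and len(lines) >= len(pattern)) else start
--     if search_start > max_start:
--         return None
--     for i in range(search_start, max_start + 1):
--         if all(lines[i + idx] == pattern[idx] for idx in range(len(pattern))):
--             return i
--     for i in range(search_start, max_start + 1):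
--         if all(lines[i + idx].rstrip() == pattern[idx].rstrip() for idx in range(len(pattern))):
--             return i
--     for i in range(search_start, max_start + 1):
--         if all(lines[i + idx].strip() == pattern[idx].strip() for idx in range(len(pattern))):
--             return i
--     return None
-- ===== SOURCE B (Python) =====
-- def _seek_sequence(
--     lines: list[str],
--     pattern: list[str],
--     start: int,
--     eof: bool,
-- ) -> int | None:
--     if not pattern:
--         return start
--     n, m = len(lines), len(pattern)
--     if m > n:
--         return None
--     max_start = n - m
--     search_start = max_start if (eof and n >= m) else start
--     if search_start > max_start:
--         return None
--     # normalize once, instead of re-stripping every line for every window and pass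
--     rl = [l.rstrip() for l in lines]
--     pr = [p.rstrip() for p in pattern]
--     sl = [l.strip() for l in lines]
--     ps = [p.strip() for p in pattern]
--     first_rstrip = None
--     first_strip = None
--     # single pass: exact match wins immediately; otherwise remember the first
--     # rstrip-normalized and first strip-normalized match and decide at the end
--     for i in range(search_start, max_start + 1):
--         if all(lines[i + k] == pattern[k] for k in range(m)):
--             return i
--         if first_rstrip is None and all(rl[i + k] == pr[k] for k in range(m)):
--             first_rstrip = i
--         if first_strip is None and all(sl[i + k] == ps[k] for k in range(m)):
--             first_strip = i
--     return first_rstrip if first_rstrip is not None else first_strip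
-- ===== Notes on version B (the rewrite author's own statement) =====
-- stated objective: alternative
-- what changed: B replaces A's three sequential full scans over the window range by one pre-normalization of the lines (rstrip/strip computed once each) and a single pass that returns an exact match immediately and otherwise remembers the first rstrip- and strip-normalized matches; it trades A's repeated per-window stripping for upfront normalization at the same overall cost.
import Mathlib
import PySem

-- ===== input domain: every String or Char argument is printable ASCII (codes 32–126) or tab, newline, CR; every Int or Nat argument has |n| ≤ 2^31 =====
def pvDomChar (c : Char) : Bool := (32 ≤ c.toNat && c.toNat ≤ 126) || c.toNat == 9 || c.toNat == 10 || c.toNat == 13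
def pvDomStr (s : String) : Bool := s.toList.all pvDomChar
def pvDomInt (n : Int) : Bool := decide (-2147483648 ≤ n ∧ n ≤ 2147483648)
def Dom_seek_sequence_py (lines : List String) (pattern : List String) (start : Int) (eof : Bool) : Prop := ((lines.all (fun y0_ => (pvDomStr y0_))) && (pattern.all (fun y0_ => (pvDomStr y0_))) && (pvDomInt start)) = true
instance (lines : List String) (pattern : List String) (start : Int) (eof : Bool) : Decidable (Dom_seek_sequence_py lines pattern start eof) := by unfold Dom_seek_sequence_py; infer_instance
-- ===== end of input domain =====

-- B pre-normalizes all lines once and finds all three match tiers in a single pass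
-- (exact match returns immediately; first rstrip-/strip-normalized matches are remembered),
-- instead of A's three passes that re-strip every line of every window.


-- ===== PORT A =====
-- all(f(lines[i+idx]) == f(pattern[idx]) for idx in range(len(pattern))), with f the pass's normalization
def pvMatchA (lines pattern : List String) (f : String → String) (i : Int) : Bool :=
  (PySem.List.pyRange 0 pattern.length 1).all fun idx =>
    (PySem.List.pyGet? lines (i + idx)).map f == (PySem.List.pyGet? pattern idx).map f

def seek_sequence_py (lines : List String) (pattern : List String) (start : Int) (eof : Bool) : Option Int :=
  if pattern.isEmpty then some start
  else if (pattern.length : Int) > (lines.length : Int) then none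
  else
    let max_start : Int := (lines.length : Int) - (pattern.length : Int)
    let search_start : Int := if eof && decide ((lines.length : Int) ≥ (pattern.length : Int)) then max_start else start
    if search_start > max_start then none
    else
      let R := PySem.List.pyRange search_start (max_start + 1) 1
      match R.find? (pvMatchA lines pattern id) with
      | some i => some i
      | none =>
        match R.find? (pvMatchA lines pattern PySem.Str.rstrip) with
        | some i => some i
        | none =>
          match R.find? (pvMatchA lines pattern PySem.Str.strip) with
          | some i => some i
          | none => none

-- ===== PORT B =====
-- all(xs[i+k] == ps[k] for k in range(m)) on the pre-normalized lists
def pvMatchB (xs ps : List String) (i : Int) : Bool :=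
  (PySem.List.pyRange 0 ps.length 1).all fun k =>
    PySem.List.pyGet? xs (i + k) == PySem.List.pyGet? ps k

-- the single for-loop with its two "first ..." accumulators
def pvLoopB (lines pattern rl pr sl ps : List String) :
    List Int → Option Int → Option Int → Option Int
  | [], r1, r2 => match r1 with | some _ => r1 | none => r2
  | i :: rest, r1, r2 =>
    if pvMatchB lines pattern i then some i
    else
      pvLoopB lines pattern rl pr sl ps rest
        (match r1 with | some _ => r1 | none => if pvMatchB rl pr i then some i else none)
        (match r2 with | some _ => r2 | none => if pvMatchB sl ps i then some i else none)

def seek_sequence_py_alt (lines : List String) (pattern : List String) (start : Int) (eof : Bool) : Option Int :=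
  if pattern.isEmpty then some start
  else if (pattern.length : Int) > (lines.length : Int) then none
  else
    let max_start : Int := (lines.length : Int) - (pattern.length : Int)
    let search_start : Int := if eof && decide ((lines.length : Int) ≥ (pattern.length : Int)) then max_start else start
    if search_start > max_start then none
    else
      let rl := lines.map PySem.Str.rstrip
      let pr := pattern.map PySem.Str.rstrip
      let sl := lines.map PySem.Str.strip
      let ps := pattern.map PySem.Str.strip
      pvLoopB lines pattern rl pr sl ps (PySem.List.pyRange search_start (max_start + 1) 1) none none

-- ===== PRECONDITION & SPEC =====
-- Pre_ excludes exactly the inputs where A raises IndexError: a non-empty pattern that fits,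
-- eof unset, start within the window range but below -len(lines) (lines[start] is out of range).
def Pre_seek_sequence_py (lines : List String) (pattern : List String) (start : Int) (eof : Bool) : Prop :=
  pattern = [] ∨ (lines.length : Int) < (pattern.length : Int) ∨ eof = true ∨
  (lines.length : Int) - (pattern.length : Int) < start ∨ -(lines.length : Int) ≤ start
instance (lines : List String) (pattern : List String) (start : Int) (eof : Bool) : Decidable (Pre_seek_sequence_py lines pattern start eof) := by unfold Pre_seek_sequence_py; infer_instance

def pvWitness_seek_sequence_py : List String × List String × Int × Bool := (["a", "b "], ["b"], 0, false)

def Spec_seek_sequence_py (lines : List String) (pattern : List String) (start : Int) (eof : Bool) (out : Option Int) : Prop := out = seek_sequence_py_alt lines pattern start eof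
instance (lines : List String) (pattern : List String) (start : Int) (eof : Bool) (out : Option Int) : Decidable (Spec_seek_sequence_py lines pattern start eof out) := by unfold Spec_seek_sequence_py; infer_instance

-- ===== CLAIM (what is proved, stated in full; the proofs are below) =====
def Claim_equal_seek_sequence_py : Prop := ∀ (lines : List String) (pattern : List String) (start : Int) (eof : Bool), Dom_seek_sequence_py lines pattern start eof → Pre_seek_sequence_py lines pattern start eof → Spec_seek_sequence_py lines pattern start eof (seek_sequence_py lines pattern start eof)

-- ===== LEMMAS AND PROOFS =====

theorem pvWitness_ok :
    Dom_seek_sequence_py pvWitness_seek_sequence_py.1 pvWitness_seek_sequence_py.2.1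
      pvWitness_seek_sequence_py.2.2.1 pvWitness_seek_sequence_py.2.2.2 ∧
    Pre_seek_sequence_py pvWitness_seek_sequence_py.1 pvWitness_seek_sequence_py.2.1
      pvWitness_seek_sequence_py.2.2.1 pvWitness_seek_sequence_py.2.2.2 := by decide

theorem pyGet?_map {α β : Type} (f : α → β) (l : List α) (i : Int) :
    PySem.List.pyGet? (l.map f) i = (PySem.List.pyGet? l i).map f := by
  simp only [PySem.List.pyGet?, PySem.List.pyIdx?, List.length_map]
  split_ifs <;> simp

-- matching on the f-normalized lists is A's f-normalized window test
theorem matchB_map (lines pattern : List String) (f : String → String) :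
    pvMatchB (lines.map f) (pattern.map f) = pvMatchA lines pattern f := by
  funext i
  simp [pvMatchB, pvMatchA, pyGet?_map]

theorem matchB_id (lines pattern : List String) :
    pvMatchB lines pattern = pvMatchA lines pattern id := by
  have h := matchB_map lines pattern id
  simpa using h

-- the one-pass loop with accumulators equals the three chained first-match searches
theorem loopB_eq (lines pattern rl pr sl ps : List String) (R : List Int)
    (r1 r2 : Option Int) :
    pvLoopB lines pattern rl pr sl ps R r1 r2 =
      ((R.find? (pvMatchB lines pattern)).orElse fun _ =>
        ((r1.orElse fun _ => R.find? (pvMatchB rl pr)).orElse fun _ =>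
          (r2.orElse fun _ => R.find? (pvMatchB sl ps)))) := by
  induction R generalizing r1 r2 with
  | nil => cases r1 <;> cases r2 <;> simp [pvLoopB]
  | cons i rest ih =>
    simp only [pvLoopB, List.find?]
    by_cases h0 : pvMatchB lines pattern i
    · simp [h0]
    · rw [if_neg h0, ih]
      simp only [h0]
      cases r1 <;> cases r2 <;> by_cases h1 : pvMatchB rl pr i <;>
        by_cases h2 : pvMatchB sl ps i <;> simp [h1, h2, Option.orElse]

theorem seek_sequence_py_eq (lines pattern : List String) (start : Int) (eof : Bool) :
    seek_sequence_py lines pattern start eof = seek_sequence_py_alt lines pattern start eof := by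
  unfold seek_sequence_py seek_sequence_py_alt
  split_ifs with h1 h2
  · rfl
  · rfl
  all_goals
    dsimp only
    split_ifs with h4
    · rfl
    · rw [loopB_eq, matchB_map, matchB_map, matchB_id]
      cases (PySem.List.pyRange _ _ 1).find? (pvMatchA lines pattern id) <;>
        cases (PySem.List.pyRange _ _ 1).find? (pvMatchA lines pattern PySem.Str.rstrip) <;>
          cases (PySem.List.pyRange _ _ 1).find? (pvMatchA lines pattern PySem.Str.strip) <;>
            simp [Option.orElse]

-- ===== VERDICT (by name: the statement is the Claim_ definition above) =====
theorem seek_sequence_py_spec : Claim_equal_seek_sequence_py := by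
  intro lines pattern start eof _ _
  unfold Spec_seek_sequence_py
  exact seek_sequence_py_eq lines pattern start eof
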